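-- pv_equiv track=rewrite | github.com/BinbinGood/Algorithms | 入门班/基础第八课/逆序栈.py | process
-- ===== SOURCE A (Python) =====
-- def process(stack):
--     num = stack.pop()
--     if len(stack) == 0:  # base case
--         return num
--     else:
--         last = process(stack)  # 得到剩余部分的栈底元素
--         stack.append(num)  # 把弹出的元素重新入栈
--         return last
-- ===== SOURCE B (Python) =====
-- def process(stack):
--     # Iterative version: pop everything into an auxiliary list, the last popped
--     # item is the bottom; push everything else back in reverse pop order.
--     items = []
--     while stack:
--         items.append(stack.pop())
--     bottom = items.pop()  # IndexError on empty stack, like A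
--     for x in reversed(items):
--         stack.append(x)
--     return bottom
-- ===== Notes on version B (the rewrite author's own statement) =====
-- stated objective: simpler
-- what changed: Replaces the recursion with an explicit loop that pops all elements into an auxiliary list, takes the last popped element as the bottom, and pushes the rest back; no call stack is used.
-- outside the precondition, e.g. on process([]): A raises IndexError, B raises IndexError
import Mathlib
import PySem

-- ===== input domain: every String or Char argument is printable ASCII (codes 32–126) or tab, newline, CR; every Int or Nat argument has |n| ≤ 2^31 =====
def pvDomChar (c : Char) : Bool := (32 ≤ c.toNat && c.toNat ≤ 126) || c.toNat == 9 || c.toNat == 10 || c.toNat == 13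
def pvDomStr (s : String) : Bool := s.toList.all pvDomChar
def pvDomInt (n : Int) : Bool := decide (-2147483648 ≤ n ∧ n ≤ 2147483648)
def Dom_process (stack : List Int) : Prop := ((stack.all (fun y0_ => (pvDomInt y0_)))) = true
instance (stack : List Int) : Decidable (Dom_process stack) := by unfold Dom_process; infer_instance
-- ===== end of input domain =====

-- B replaces A's recursion by an explicit pop-all/push-back loop; equivalence is about
-- the RETURN value (both A and B also leave the stack with its bottom element removed).

-- ===== PORT A =====
-- A: num = stack.pop(); if stack empty return num else last = process(stack); push num back; return last.
-- stack.pop() on the empty stack raises IndexError → excluded by Pre_process (the [] branch is unreachable).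
def process (stack : List Int) : Int :=
  if h : stack = [] then 0 -- unreachable under Pre_process (Python raises IndexError)
  else
    let num := stack.getLast h
    let rest := stack.dropLast
    if rest = [] then num
    else process rest
termination_by stack.length
decreasing_by
  simp [List.length_dropLast]
  exact List.length_pos_of_ne_nil h

-- ===== PORT B =====
-- the while loop: repeatedly pop the last element of s and append it to items
def pvPopAll (s : List Int) (items : List Int) : List Int :=
  if h : s = [] then items
  else pvPopAll s.dropLast (items ++ [s.getLast h])
termination_by s.length
decreasing_by
  simp [List.length_dropLast]
  exact List.length_pos_of_ne_nil h

def process_alt (stack : List Int) : Int :=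
  let items := pvPopAll stack []
  -- items.pop() : last element of items; empty stack is excluded by Pre_process
  match items.getLast? with
  | some bottom => bottom
  | none => 0 -- unreachable under Pre_process (Python raises IndexError)

-- ===== PRECONDITION & SPEC =====
-- A raises IndexError on the empty stack; exactly that input is excluded.
def Pre_process (stack : List Int) : Prop := stack ≠ []
instance (stack : List Int) : Decidable (Pre_process stack) := by unfold Pre_process; infer_instance
def pvWitness_process : List Int := [1, 2, 3]

def Spec_process (stack : List Int) (out : Int) : Prop := out = process_alt stack
instance (stack : List Int) (out : Int) : Decidable (Spec_process stack out) := by unfold Spec_process; infer_instance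

-- ===== CLAIM (what is proved, stated in full; the proofs are below) =====
def Claim_equal_process : Prop := ∀ (stack : List Int), Dom_process stack → Pre_process stack → Spec_process stack (process stack)

-- ===== LEMMAS AND PROOFS =====

-- A returns the bottom (first) element of a nonempty stack
theorem process_cons (s : List Int) (x : Int) : process (x :: s) = x := by
  induction hn : s.length generalizing s x with
  | zero =>
    have hs : s = [] := List.eq_nil_of_length_eq_zero hn
    subst hs
    rw [process.eq_def]
    simp
  | succ n ih =>
    have hne : s ≠ [] := by intro h; subst h; simp at hn
    rw [process.eq_def]
    have hd : (x :: s).dropLast = x :: s.dropLast := by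
      cases s with
      | nil => exact absurd rfl hne
      | cons a t => simp
    simp only [dif_neg (by simp : (x :: s) ≠ ([] : List Int))]
    rw [hd]
    rw [if_neg (by simp : (x :: s.dropLast) ≠ ([] : List Int))]
    exact ih s.dropLast x (by simp [List.length_dropLast, hn])

theorem pvPopAll_eq (s : List Int) : ∀ acc, pvPopAll s acc = acc ++ s.reverse := by
  induction hn : s.length generalizing s with
  | zero =>
    intro acc
    have hs : s = [] := List.eq_nil_of_length_eq_zero hn
    subst hs; rw [pvPopAll.eq_def]; simp
  | succ n ih =>
    intro acc
    have hne : s ≠ [] := by intro h; subst h; simp at hn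
    rw [pvPopAll.eq_def]
    rw [dif_neg hne]
    rw [ih s.dropLast (by simp [List.length_dropLast, hn])]
    have : s.dropLast ++ [s.getLast hne] = s := List.dropLast_append_getLast hne
    calc acc ++ [s.getLast hne] ++ s.dropLast.reverse
        = acc ++ ([s.getLast hne] ++ s.dropLast.reverse) := by simp
      _ = acc ++ (s.dropLast ++ [s.getLast hne]).reverse := by simp
      _ = acc ++ s.reverse := by rw [this]

theorem process_alt_cons (s : List Int) (x : Int) : process_alt (x :: s) = x := by
  unfold process_alt
  rw [pvPopAll_eq]
  simp

-- ===== VERDICT (by name: the statement is the Claim_ definition above) =====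
theorem process_spec : Claim_equal_process := by
  intro stack _ hpre
  cases stack with
  | nil => exact absurd rfl hpre
  | cons x s => unfold Spec_process; rw [process_cons, process_alt_cons]
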